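-- pv_equiv track=rewrite | github.com/binbineow/bmi214 | src/project2/kmeansv2.py | same_means
-- ===== SOURCE A (Python) =====
-- def same_means(samp_one, samp_two):
--     match_dict = {}
--     for x,y in zip(list(samp_one),list(samp_two)):
--         if x in match_dict:
--             if y != match_dict[x]:
--                 return False
--         else:
--             match_dict[x] = y
--     return True
-- ===== SOURCE B (Python) =====
-- def same_means(samp_one, samp_two):
--     # two-phase: build a table grouping each x to all y values it was paired
--     # with, then validate that every group agrees with its first element
--     groups = {}
--     for x, y in zip(list(samp_one), list(samp_two)):
--         groups.setdefault(x, []).append(y)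
--     for ys in groups.values():
--         first = ys[0]
--         for y in ys[1:]:
--             if y != first:
--                 return False
--     return True
-- ===== Notes on version B (the rewrite author's own statement) =====
-- stated objective: alternative
-- what changed: Replaces the single-pass early-return check with a two-phase shape: first build a dict grouping each x to the list of all y values it was zipped with, then validate in a second pass that every group's elements equal its first element.
import Mathlib
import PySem

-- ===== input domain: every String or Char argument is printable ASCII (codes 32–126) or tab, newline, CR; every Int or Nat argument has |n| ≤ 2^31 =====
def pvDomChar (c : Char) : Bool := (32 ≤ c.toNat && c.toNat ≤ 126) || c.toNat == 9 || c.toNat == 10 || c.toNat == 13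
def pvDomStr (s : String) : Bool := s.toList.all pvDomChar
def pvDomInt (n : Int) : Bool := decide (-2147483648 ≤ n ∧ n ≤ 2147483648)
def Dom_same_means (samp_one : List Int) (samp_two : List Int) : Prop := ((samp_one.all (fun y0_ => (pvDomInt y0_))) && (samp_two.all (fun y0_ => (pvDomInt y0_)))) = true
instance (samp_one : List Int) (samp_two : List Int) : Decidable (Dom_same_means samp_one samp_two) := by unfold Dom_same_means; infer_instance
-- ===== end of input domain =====

-- B replaces A's single-pass early-return check by a build-table-then-validate
-- two-phase shape (group all y values per x, then check each group); same cost.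

-- ===== PORT A =====
-- the 'for x,y in zip(...)' loop with early 'return False'
def same_meansLoop : List (Int × Int) → PySem.Dict Int Int → Bool
  | [], _ => true
  | (x, y) :: rest, d =>
    match d.get? x with
    | some v => if y ≠ v then false else same_meansLoop rest d
    | none => same_meansLoop rest (d.insert x y)

def same_means (samp_one : List Int) (samp_two : List Int) : Bool :=
  same_meansLoop (samp_one.zip samp_two) PySem.Dict.empty

-- ===== PORT B =====
-- the validation of one group: ys[1:] compared with ys[0]
def groupOk : List Int → Bool
  | [] => true
  | first :: rest => rest.all (fun y => y == first)

def same_means_alt (samp_one : List Int) (samp_two : List Int) : Bool :=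
  let groups := (samp_one.zip samp_two).foldl
    (fun g p => g.modify p.1 [] (fun l => l ++ [p.2])) PySem.Dict.empty
  groups.values.all groupOk

-- ===== PRECONDITION & SPEC =====
def Spec_same_means (samp_one : List Int) (samp_two : List Int) (out : Bool) : Prop := out = same_means_alt samp_one samp_two
instance (samp_one : List Int) (samp_two : List Int) (out : Bool) : Decidable (Spec_same_means samp_one samp_two out) := by unfold Spec_same_means; infer_instance

-- ===== CLAIM (what is proved, stated in full; the proofs are below) =====
def Claim_equal_same_means : Prop := ∀ (samp_one : List Int) (samp_two : List Int), Dom_same_means samp_one samp_two → Spec_same_means samp_one samp_two (same_means samp_one samp_two)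

-- ===== LEMMAS AND PROOFS =====

-- the group of x: all y values paired with x, in order
def grp (pairs : List (Int × Int)) (x : Int) : List Int :=
  (pairs.filter (fun q => q.1 == x)).map (fun q => q.2)

-- the first y paired with x
def fv (pairs : List (Int × Int)) (x : Int) : Int := (grp pairs x).headD 0

theorem mem_grp {pairs : List (Int × Int)} {x y : Int} :
    y ∈ grp pairs x ↔ ∃ p ∈ pairs, p.1 = x ∧ p.2 = y := by
  simp [grp, List.mem_map, List.mem_filter]

theorem grp_cons_self (x y : Int) (rest : List (Int × Int)) :
    grp ((x, y) :: rest) x = y :: grp rest x := by simp [grp]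

theorem grp_cons_ne {x x' : Int} (h : x' ≠ x) (y : Int) (rest : List (Int × Int)) :
    grp ((x, y) :: rest) x' = grp rest x' := by
  simp [grp, (by simpa using h.symm : ¬ (x == x') = true)]

theorem fv_cons_self (x y : Int) (rest : List (Int × Int)) :
    fv ((x, y) :: rest) x = y := by simp [fv, grp_cons_self]

theorem fv_cons_ne {x x' : Int} (h : x' ≠ x) (y : Int) (rest : List (Int × Int)) :
    fv ((x, y) :: rest) x' = fv rest x' := by simp [fv, grp_cons_ne h]

-- characterisation of A's loop, generalised over the accumulated dict
theorem same_meansLoop_iff : ∀ (pairs : List (Int × Int)) (d : PySem.Dict Int Int),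
    same_meansLoop pairs d = true ↔
      ∀ p ∈ pairs, p.2 = (d.get? p.1).getD (fv pairs p.1) := by
  intro pairs
  induction pairs with
  | nil => intro d; simp [same_meansLoop]
  | cons hd rest ih =>
    intro d
    obtain ⟨x, y⟩ := hd
    by_cases hc : ∃ v, d.get? x = some v
    · obtain ⟨v, hv⟩ := hc
      simp only [same_meansLoop, hv]
      by_cases hy : y = v
      · rw [if_neg (by simp [hy])]
        rw [ih d]
        simp only [List.mem_cons, forall_eq_or_imp]
        constructor
        · intro h
          refine ⟨by simp [hv, hy], fun p hp => ?_⟩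
          rw [h p hp]
          by_cases hpx : p.1 = x
          · simp [hpx, hv]
          · rw [fv_cons_ne hpx]
        · rintro ⟨-, h⟩ p hp
          rw [h p hp]
          by_cases hpx : p.1 = x
          · simp [hpx, hv]
          · rw [fv_cons_ne hpx]
      · rw [if_pos hy]
        simp only [Bool.false_eq_true, false_iff]
        intro h
        exact hy (by simpa [hv] using h (x, y) (by simp))
    · push Not at hc
      have hn : d.get? x = none := by
        cases h : d.get? x with
        | none => rfl
        | some v => exact absurd h (hc v)
      simp only [same_meansLoop, hn]
      rw [ih (d.insert x y)]
      constructor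
      · intro h p hp
        rcases List.mem_cons.mp hp with hpe | hpr
        · subst hpe; simp [hn, fv_cons_self]
        · rw [h p hpr]
          by_cases hpx : p.1 = x
          · rw [PySem.Dict.get?_insert, if_pos hpx, hpx, hn, fv_cons_self]; rfl
          · rw [PySem.Dict.get?_insert, if_neg hpx, fv_cons_ne hpx]
      · intro h p hp
        have hpv := h p (List.mem_cons_of_mem _ hp)
        by_cases hpx : p.1 = x
        · rw [PySem.Dict.get?_insert, if_pos hpx]
          rw [hpx, hn, fv_cons_self] at hpv
          simpa using hpv
        · rw [PySem.Dict.get?_insert, if_neg hpx]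
          rwa [fv_cons_ne hpx] at hpv

theorem groupOk_iff (ys : List Int) :
    groupOk ys = true ↔ ∀ y ∈ ys, y = ys.headD 0 := by
  cases ys with
  | nil => simp [groupOk]
  | cons f rest => simp [groupOk, List.all_eq_true]

-- B's groups dict lookup is exactly grp
theorem same_means_alt_iff (samp_one samp_two : List Int) :
    same_means_alt samp_one samp_two = true ↔
      ∀ p ∈ samp_one.zip samp_two, p.2 = fv (samp_one.zip samp_two) p.1 := by
  set pairs := samp_one.zip samp_two with hpairs
  have hnodup : (pairs.foldl (fun g p => g.modify p.1 [] (fun l => l ++ [p.2]))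
      (PySem.Dict.empty : PySem.Dict Int (List Int))).keys.Nodup := by
    exact PySem.Dict.nodup_keys_foldl_modify_key pairs (fun p => p.1) []
      (fun d p => fun l => l ++ [p.2]) PySem.Dict.empty (by simp)
  have hkeys : (pairs.foldl (fun g p => g.modify p.1 [] (fun l => l ++ [p.2]))
      (PySem.Dict.empty : PySem.Dict Int (List Int))).keys
      = PySem.Set.ofList (pairs.map (fun p => p.1)) := by
    rw [PySem.Dict.keys_foldl_modify_key pairs (fun p => p.1) []
      (fun d p => fun l => l ++ [p.2]) PySem.Dict.empty]
    simp [PySem.Set.update_nil_left]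
  have hget : ∀ k, (pairs.foldl (fun g p => g.modify p.1 [] (fun l => l ++ [p.2]))
      (PySem.Dict.empty : PySem.Dict Int (List Int))).getD k [] = grp pairs k := by
    intro k
    rw [PySem.Dict.getD_foldl_modify_append]
    simp [grp]
  unfold same_means_alt
  rw [← hpairs]
  simp only [List.all_eq_true]
  rw [PySem.Dict.values_eq_map_keys _ hnodup []]
  constructor
  · intro h p hp
    have hk : p.1 ∈ (pairs.foldl (fun g p => g.modify p.1 [] (fun l => l ++ [p.2]))
        (PySem.Dict.empty : PySem.Dict Int (List Int))).keys := by
      rw [hkeys, PySem.Set.mem_ofList]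
      exact List.mem_map.mpr ⟨p, hp, rfl⟩
    have hok := h _ (List.mem_map.mpr ⟨p.1, hk, rfl⟩)
    rw [hget] at hok
    have hmem : p.2 ∈ grp pairs p.1 := mem_grp.mpr ⟨p, hp, rfl, rfl⟩
    exact (groupOk_iff _).mp hok _ hmem
  · intro h ys hys
    obtain ⟨k, hk, rfl⟩ := List.mem_map.mp hys
    rw [hget]
    rw [groupOk_iff]
    intro y hy
    obtain ⟨p, hp, hpk, hpy⟩ := mem_grp.mp hy
    have := h p hp
    rw [hpy, hpk] at this
    exact this

-- ===== VERDICT (by name: the statement is the Claim_ definition above) =====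
theorem same_means_spec : Claim_equal_same_means := by
  intro samp_one samp_two _
  unfold Spec_same_means
  rw [Bool.eq_iff_iff]
  rw [same_means_alt_iff]
  unfold same_means
  rw [same_meansLoop_iff]
  simp [PySem.Dict.get?_empty]
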